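-- pv_equiv track=rewrite | github.com/collintautfest/Collin-s-Intro-to-Cryptography-repo | Projects/primitive_elements.py | is_prime_power
-- ===== SOURCE A (Python) =====
-- import math
--
-- def is_prime(x):
--     """
--     checks if a element is prime
--     """
--     if x < 2:
--         return False
--     for i in range(2, int(math.sqrt(x)) + 1):
--         if x % i == 0:
--             return False
--     return True
--
-- def is_prime_power(n, require_odd=False):
--     # Try every possible prime base up to sqrt(n)
--     for p in range(2, int(math.sqrt(n)) + 1):
--         if n % p == 0 and is_prime(p):
--             if require_odd and p == 2:
--                 continue  # skip even prime if we need odd only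
--
--             m = n
--             # Divide out all factors of p
--             while m % p == 0:
--                 m //= p
--
--             # If we reduced all the way to 1, it's a perfect prime power
--             if m == 1:
--                 return True
--
--     # Special case: n itself is prime (p^1)
--     if is_prime(n):
--         if require_odd and n == 2:
--             return False
--         return True
--
--     return False
-- ===== SOURCE B (Python) =====
-- def is_prime_power(n, require_odd=False):
--     p = 2
--     while p * p <= n:
--         if n % p == 0:
--             # p is the smallest divisor of n >= 2, hence automatically prime
--             m = n
--             while m % p == 0:
--                 m //= p
--             if m != 1:
--                 return False          # another prime factor remains
--             return not (require_odd and p == 2)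
--         p += 1
--     # no divisor <= sqrt(n): n is a prime power iff n itself is prime, i.e. n >= 2
--     if n < 2:
--         return False
--     return not (require_odd and n == 2)
-- ===== Notes on version B (the rewrite author's own statement) =====
-- stated objective: simpler
-- what changed: B scans for the smallest divisor only and decides immediately at the first one found (it is necessarily prime, so no inner primality test and no second is_prime(n) scan), using a while loop with p*p<=n instead of A's full base scan with is_prime on every candidate plus a redundant trailing is_prime(n) pass.
import Mathlib
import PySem

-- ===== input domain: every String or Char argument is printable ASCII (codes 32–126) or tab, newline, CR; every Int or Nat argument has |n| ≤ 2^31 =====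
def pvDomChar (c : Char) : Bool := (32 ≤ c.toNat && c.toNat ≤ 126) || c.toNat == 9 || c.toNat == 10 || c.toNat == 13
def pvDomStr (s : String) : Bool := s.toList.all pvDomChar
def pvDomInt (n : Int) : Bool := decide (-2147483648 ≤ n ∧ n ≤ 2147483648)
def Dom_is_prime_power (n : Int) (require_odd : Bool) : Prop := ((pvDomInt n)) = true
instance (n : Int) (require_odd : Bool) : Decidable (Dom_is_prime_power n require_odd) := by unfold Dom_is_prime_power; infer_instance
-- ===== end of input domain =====

-- B stops at the first divisor found (necessarily the smallest prime factor) and decides there,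
-- dropping A's per-candidate is_prime test and A's second trailing is_prime(n) scan; equal to A on n ≥ 0.

-- ===== PORT A =====
-- int(math.sqrt(x)) is exact as Nat.sqrt x.toNat on the 0 ≤ x ≤ 2^31 inputs the claim covers
def pv_is_prime (x : Int) : Bool :=
  if x < 2 then false
  else (PySem.List.pyRange 2 ((Nat.sqrt x.toNat : Int) + 1) 1).all
        (fun i => !(PySem.Int.mod x i == 0))

-- 'while m % p == 0: m //= p' — on the m ≥ 4, p ≥ 2 this loop is reached with, Python's // is Nat division
-- (exact); fuel m suffices because m strictly decreases at every division step
def pv_stripF (p : Nat) : Nat → Nat → Nat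
  | 0, m => m
  | f + 1, m => if 2 ≤ p ∧ 0 < m ∧ m % p = 0 then pv_stripF p f (m / p) else m

def pv_strip (p m : Nat) : Nat := pv_stripF p m m

-- the 'for p in range(...)' loop of A, with the post-loop fallback as the base case
def pv_loopA (n : Int) (r : Bool) : List Int → Bool
  | [] =>
      if pv_is_prime n then (if r && n == 2 then false else true) else false
  | p :: ps =>
      if PySem.Int.mod n p == 0 && pv_is_prime p then
        if r && p == 2 then pv_loopA n r ps
        else if pv_strip p.toNat n.toNat == 1 then true
        else pv_loopA n r ps
      else pv_loopA n r ps

def is_prime_power (n : Int) (require_odd : Bool) : Bool :=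
  pv_loopA n require_odd (PySem.List.pyRange 2 ((Nat.sqrt n.toNat : Int) + 1) 1)

-- ===== PORT B =====
-- B's 'while p * p <= n' loop; the trailing 'if n < 2 …' of B is the base case.
-- Fuel n.toNat + 1 suffices: the loop stops once p * p > n and p grows by 1 from 2 each step.
def pv_loopBF (n : Int) (r : Bool) : Nat → Nat → Bool
  | 0, _ => false
  | f + 1, p =>
    if (p : Int) * p ≤ n then
      if PySem.Int.mod n p == 0 then
        (if pv_strip p n.toNat == 1 then !(r && (p : Int) == 2) else false)
      else pv_loopBF n r f (p + 1)
    else if n < 2 then false else !(r && n == 2)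

def is_prime_power_alt (n : Int) (require_odd : Bool) : Bool :=
  pv_loopBF n require_odd (n.toNat + 1) 2

-- ===== PRECONDITION & SPEC =====
-- Pre_ excludes exactly n < 0, where A's math.sqrt(n) raises ValueError (B returns False there).
def Pre_is_prime_power (n : Int) (require_odd : Bool) : Prop := 0 ≤ n
instance (n : Int) (require_odd : Bool) : Decidable (Pre_is_prime_power n require_odd) := by unfold Pre_is_prime_power; infer_instance

def pvWitness_is_prime_power : Int × Bool := (9, false)

def Spec_is_prime_power (n : Int) (require_odd : Bool) (out : Bool) : Prop := out = is_prime_power_alt n require_odd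
instance (n : Int) (require_odd : Bool) (out : Bool) : Decidable (Spec_is_prime_power n require_odd out) := by unfold Spec_is_prime_power; infer_instance

-- ===== CLAIM (what is proved, stated in full; the proofs are below) =====
def Claim_equal_is_prime_power : Prop := ∀ (n : Int) (require_odd : Bool), Dom_is_prime_power n require_odd → Pre_is_prime_power n require_odd → Spec_is_prime_power n require_odd (is_prime_power n require_odd)

-- ===== LEMMAS AND PROOFS =====

lemma pv_stripF_eq (p : Nat) (m : Nat) : ∀ (f f' : Nat), m ≤ f → m ≤ f' → pv_stripF p f m = pv_stripF p f' m := by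
  induction m using Nat.strong_induction_on with
  | _ m ih =>
    intro f f' hf hf'
    match f, f' with
    | 0, 0 => rfl
    | 0, g + 1 =>
        have hm : m = 0 := by omega
        subst hm
        simp [pv_stripF]
    | g + 1, 0 =>
        have hm : m = 0 := by omega
        subst hm
        simp [pv_stripF]
    | g + 1, g' + 1 =>
        simp only [pv_stripF]
        split_ifs with hc
        · have hlt : m / p < m := Nat.div_lt_self hc.2.1 (by omega)
          exact ih (m / p) hlt g g' (by omega) (by omega)
        · rfl

lemma pv_strip_unfold (p m : Nat) :
    pv_strip p m = if 2 ≤ p ∧ 0 < m ∧ m % p = 0 then pv_strip p (m / p) else m := by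
  cases m with
  | zero => simp [pv_strip, pv_stripF]
  | succ k =>
    show pv_stripF p (k + 1) (k + 1) = _
    simp only [pv_stripF]
    split_ifs with hc
    · have hlt : (k + 1) / p < k + 1 := Nat.div_lt_self hc.2.1 (by omega)
      exact pv_stripF_eq p ((k + 1) / p) k ((k + 1) / p) (by omega) (le_refl _)
    · rfl

lemma pv_strip_pow (p k : Nat) (hp : 2 ≤ p) : pv_strip p (p ^ k) = 1 := by
  induction k with
  | zero =>
      rw [pow_zero, pv_strip_unfold, if_neg]
      rintro ⟨hp2, -, hm⟩
      rw [Nat.one_mod_eq_one.mpr (by omega)] at hm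
      exact one_ne_zero hm
  | succ k ih =>
      rw [pv_strip_unfold]
      have h1 : p ^ (k + 1) % p = 0 := by
        simp [pow_succ, Nat.mul_mod_left]
      have h2 : 0 < p ^ (k + 1) := pow_pos (by omega) _
      rw [if_pos ⟨hp, h2, h1⟩]
      have : p ^ (k + 1) / p = p ^ k := by
        rw [pow_succ, Nat.mul_div_cancel _ (by omega)]
      rw [this]; exact ih

lemma pv_strip_eq_one_pow (p : Nat) (hp : 2 ≤ p) (m : Nat) (h : pv_strip p m = 1) :
    ∃ k, m = p ^ k := by
  induction m using Nat.strong_induction_on with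
  | _ m ih =>
    rw [pv_strip_unfold] at h
    split_ifs at h with hc
    · obtain ⟨k, hk⟩ := ih (m / p) (Nat.div_lt_self hc.2.1 (by omega)) h
      refine ⟨k + 1, ?_⟩
      have hd : p ∣ m := Nat.dvd_of_mod_eq_zero hc.2.2
      rw [pow_succ, ← hk, Nat.div_mul_cancel hd]
    · exact ⟨0, by simpa using h⟩

lemma pv_is_prime_iff (x : Int) (hx : 0 ≤ x) : pv_is_prime x = true ↔ Nat.Prime x.toNat := by
  by_cases h2 : x < 2
  · simp only [pv_is_prime, if_pos h2]
    constructor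
    · intro h; cases h
    · intro hP; exact absurd hP.two_le (by omega)
  · have hxe : x = ((x.toNat : Nat) : Int) := (Int.toNat_of_nonneg hx).symm
    rw [pv_is_prime, if_neg h2, List.all_eq_true, Nat.prime_def_le_sqrt]
    constructor
    · intro h
      refine ⟨by omega, fun m hm hms hdvd => ?_⟩
      have hmem : ((m : Nat) : Int) ∈ PySem.List.pyRange 2 ((Nat.sqrt x.toNat : Int) + 1) 1 := by
        rw [PySem.List.mem_pyRange_one]
        constructor
        · exact_mod_cast hm
        · push_cast; omega
      have hz : PySem.Int.mod x ((m : Nat) : Int) = 0 := by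
        rw [PySem.Int.mod_eq_zero_iff_dvd, hxe]
        exact_mod_cast hdvd
      have := h _ hmem
      simp [hz] at this
    · rintro ⟨h2n, h⟩ i hi
      rw [PySem.List.mem_pyRange_one] at hi
      rw [Bool.not_eq_true', beq_eq_false_iff_ne, Ne, PySem.Int.mod_eq_zero_iff_dvd]
      intro hz
      have hidvd : i.toNat ∣ x.toNat := by
        have : ((i.toNat : Nat) : Int) ∣ ((x.toNat : Nat) : Int) := by
          rw [Int.toNat_of_nonneg (by omega : (0:Int) ≤ i), ← hxe]; exact hz
        exact_mod_cast this
      exact h i.toNat (by omega) (by omega) hidvd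

lemma pv_loopBF_no_div (n : Int) (r : Bool) :
    ∀ (f p : Nat), 1 ≤ f → 1 ≤ p → Int.toNat n + 2 ≤ f + p →
    (∀ q : Nat, p ≤ q → (q : Int) * q ≤ n → ¬ (q : Int) ∣ n) →
    pv_loopBF n r f p = (if n < 2 then false else !(r && n == 2)) := by
  intro f
  induction f with
  | zero => intro p hf hp hfp h; omega
  | succ f ih =>
    intro p hf hp hfp h
    simp only [pv_loopBF]
    by_cases hpp : (p : Int) * p ≤ n
    · rw [if_pos hpp]
      have hmod : (PySem.Int.mod n (p : Int) == 0) = false := by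
        simp [PySem.Int.mod_eq_zero_iff_dvd, h p le_rfl hpp]
      rw [hmod, if_neg (by simp)]
      have hpn : p ≤ Int.toNat n := by
        have h1 : (1 : Int) ≤ (p : Int) := by exact_mod_cast hp
        have h2 : (p : Int) ≤ (p : Int) * p := by nlinarith
        omega
      exact ih (p + 1) (by omega) (by omega) (by omega) (fun q hq => h q (by omega))
    · rw [if_neg hpp]

lemma pv_loopBF_reach (n : Int) (r : Bool) (p0 : Nat)
    (hsq : (p0 : Int) * p0 ≤ n) (hdvd : (p0 : Int) ∣ n) :
    ∀ (f p : Nat), 1 ≤ f → 1 ≤ p → Int.toNat n + 2 ≤ f + p → p ≤ p0 →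
    (∀ q : Nat, p ≤ q → q < p0 → ¬ (q : Int) ∣ n) →
    pv_loopBF n r f p = (if pv_strip p0 n.toNat == 1 then !(r && (p0 : Int) == 2) else false) := by
  intro f
  induction f with
  | zero => intro p hf hp hfp hle h; omega
  | succ f ih =>
    intro p hf hp hfp hle h
    simp only [pv_loopBF]
    by_cases hpp : (p : Int) * p ≤ n
    · rw [if_pos hpp]
      by_cases hmod : (PySem.Int.mod n (p : Int) == 0) = true
      · have hpe : p = p0 := by
          by_contra hne
          exact h p le_rfl (by omega) ((PySem.Int.mod_eq_zero_iff_dvd _ _).mp (by simpa using hmod))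
        subst hpe
        rw [if_pos hmod]
      · rw [if_neg hmod]
        have hplt : p < p0 := by
          rcases Nat.lt_or_ge p p0 with hx | hx
          · exact hx
          · exfalso
            apply hmod
            have hpe : p = p0 := by omega
            subst hpe
            simp [(PySem.Int.mod_eq_zero_iff_dvd _ _).mpr hdvd]
        have hp0n : p0 ≤ Int.toNat n := by
          have h1 : (1 : Int) ≤ (p0 : Int) := by exact_mod_cast (by omega : 1 ≤ p0)
          have h2 : (p0 : Int) ≤ (p0 : Int) * p0 := by nlinarith
          omega
        exact ih (p + 1) (by omega) (by omega) (by omega) (by omega)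
          (fun q hq => h q (by omega))
    · exfalso
      apply hpp
      calc (p : Int) * p ≤ (p0 : Int) * p0 := by
            have hc : (p : Int) ≤ p0 := by exact_mod_cast hle
            nlinarith [Int.natCast_nonneg p]
        _ ≤ n := hsq
-- the condition under which A's loop body returns True at base p
def pv_trig (n : Int) (r : Bool) (p : Int) : Bool :=
  ((PySem.Int.mod n p == 0 && pv_is_prime p) && !(r && p == 2)) && (pv_strip p.toNat n.toNat == 1)

-- A's value when the loop falls through (the post-loop code of A)
def pv_fallA (n : Int) (r : Bool) : Bool :=
  if pv_is_prime n then (if r && n == 2 then false else true) else false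

lemma pv_loopA_cons (n : Int) (r : Bool) (p : Int) (ps : List Int) :
    pv_loopA n r (p :: ps) =
      (if PySem.Int.mod n p == 0 && pv_is_prime p then
        if r && p == 2 then pv_loopA n r ps
        else if pv_strip p.toNat n.toNat == 1 then true
        else pv_loopA n r ps
      else pv_loopA n r ps) := rfl

lemma pv_loopA_eq_any (n : Int) (r : Bool) (l : List Int) :
    pv_loopA n r l = (l.any (pv_trig n r) || pv_fallA n r) := by
  induction l with
  | nil => simp [pv_loopA, pv_fallA]
  | cons p ps ih =>
    rw [pv_loopA_cons, List.any_cons]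
    by_cases h1 : (PySem.Int.mod n p == 0 && pv_is_prime p) = true
    · by_cases h2 : (r && p == 2) = true
      · simp [h1, h2, ih, pv_trig]
      · by_cases h3 : (pv_strip p.toNat n.toNat == 1) = true
        · simp [h1, h2, h3, pv_trig]
        · simp [h1, h2, h3, ih, pv_trig]
    · simp [h1, ih, pv_trig]

lemma pv_main (n : Int) (r : Bool) (hn : 0 ≤ n) :
    is_prime_power n r = is_prime_power_alt n r := by
  have hxe : n = ((n.toNat : Nat) : Int) := (Int.toNat_of_nonneg hn).symm
  rw [is_prime_power, pv_loopA_eq_any]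
  by_cases hdiv : ∃ q : Nat, 2 ≤ q ∧ q * q ≤ n.toNat ∧ q ∣ n.toNat
  · set p0 := Nat.find hdiv with hp0def
    obtain ⟨hp02, hp0sq, hp0dvd⟩ := Nat.find_spec hdiv
    have hmin : ∀ q < p0, ¬ (2 ≤ q ∧ q * q ≤ n.toNat ∧ q ∣ n.toNat) :=
      fun q hq => Nat.find_min hdiv hq
    have hp0prime : Nat.Prime p0 := by
      rw [Nat.prime_def_lt]
      refine ⟨hp02, fun m hm hmd => ?_⟩
      by_contra hm1
      have hm0 : m ≠ 0 := by rintro rfl; rw [zero_dvd_iff] at hmd; omega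
      exact hmin m hm ⟨by omega, le_trans (Nat.mul_le_mul hm.le hm.le) hp0sq,
        hmd.trans hp0dvd⟩
    have hsqI : (p0 : Int) * p0 ≤ n := by rw [hxe]; exact_mod_cast hp0sq
    have hdvdI : (p0 : Int) ∣ n := by rw [hxe]; exact_mod_cast hp0dvd
    have hnodvd : ∀ q : Nat, 2 ≤ q → q < p0 → ¬ (q : Int) ∣ n := by
      intro q h2q hq hqd
      have hqN : q ∣ n.toNat := by
        have : ((q : Nat) : Int) ∣ ((n.toNat : Nat) : Int) := by rw [← hxe]; exact hqd
        exact_mod_cast this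
      exact hmin q hq ⟨h2q, by nlinarith, hqN⟩
    rw [is_prime_power_alt,
      pv_loopBF_reach n r p0 hsqI hdvdI (n.toNat + 1) 2 (by omega) (by omega) (by omega) hp02
        (fun q hq => hnodvd q hq)]
    have hN4 : 4 ≤ n.toNat := le_trans (by nlinarith) hp0sq
    by_cases hs : pv_strip p0 n.toNat = 1
    · obtain ⟨k, hk⟩ := pv_strip_eq_one_pow p0 hp02 n.toNat hs
      have hk2 : 2 ≤ k := by
        rcases k with _ | _ | k
        · simp at hk; omega
        · rw [pow_one] at hk; nlinarith
        · omega
      by_cases hr2 : (r && (p0 : Int) == 2) = true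
      · -- r = true, p0 = 2, n = 2^k with k ≥ 2: both sides are false
        have hre : r = true ∧ ((p0 : Nat) : Int) = 2 := by simpa using hr2
        have hr : r = true := hre.1
        have hp0e : p0 = 2 := by exact_mod_cast hre.2
        have hany : (PySem.List.pyRange 2 ((Nat.sqrt n.toNat : Int) + 1) 1).any (pv_trig n r) = false := by
          rw [List.any_eq_false]
          intro q hq
          rw [PySem.List.mem_pyRange_one] at hq
          unfold pv_trig
          by_cases hqd : (PySem.Int.mod n q == 0) = true
          · by_cases hqp : pv_is_prime q = true
            · -- q is a prime divisor of 2^k, so q = 2; the !(r && q == 2) factor kills it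
              have hqP : Nat.Prime q.toNat := (pv_is_prime_iff q (by omega)).mp hqp
              have hqN : q.toNat ∣ n.toNat := by
                have h1 : q ∣ n := (PySem.Int.mod_eq_zero_iff_dvd _ _).mp (beq_iff_eq.mp hqd)
                have : ((q.toNat : Nat) : Int) ∣ ((n.toNat : Nat) : Int) := by
                  rw [Int.toNat_of_nonneg (by omega : (0:Int) ≤ q), ← hxe]; exact h1
                exact_mod_cast this
              have hq2 : q.toNat = 2 := by
                rw [hk, hp0e] at hqN
                exact (Nat.prime_dvd_prime_iff_eq hqP Nat.prime_two).mp
                  (hqP.dvd_of_dvd_pow hqN)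
              have hqe : q = 2 := by omega
              simp [hqe, hr]
            · simp [hqp]
          · simp [hqd]
        rw [hany]
        have hnp : pv_is_prime n = false := by
          rw [← Bool.not_eq_true, pv_is_prime_iff n hn]
          intro hP
          rcases hP.eq_one_or_self_of_dvd 2 (by rw [hk, hp0e]; exact dvd_pow_self 2 (by omega)) with h | h
          · omega
          · omega
        simp [pv_fallA, hnp, hs, hr2]
      · -- the loop of A fires at p0
        have hmem : ((p0 : Nat) : Int) ∈ PySem.List.pyRange 2 ((Nat.sqrt n.toNat : Int) + 1) 1 := by
          rw [PySem.List.mem_pyRange_one]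
          have : p0 ≤ Nat.sqrt n.toNat := Nat.le_sqrt.mpr hp0sq
          constructor
          · exact_mod_cast hp02
          · push_cast; omega
        have htrig : pv_trig n r ((p0 : Nat) : Int) = true := by
          unfold pv_trig
          have hmz : (PySem.Int.mod n ((p0:Nat):Int) == 0) = true :=
            beq_iff_eq.mpr ((PySem.Int.mod_eq_zero_iff_dvd _ _).mpr hdvdI)
          have hpp : pv_is_prime ((p0:Nat):Int) = true := by
            rw [pv_is_prime_iff _ (by positivity)]
            simpa using hp0prime
          simp [hmz, hpp, hr2, hs]
        have hany : (PySem.List.pyRange 2 ((Nat.sqrt n.toNat : Int) + 1) 1).any (pv_trig n r) = true :=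
          List.any_eq_true.mpr ⟨_, hmem, htrig⟩
        simp [hany, hs, hr2]
    · -- strip ≠ 1: n has two distinct prime factors; both sides are false
      have hany : (PySem.List.pyRange 2 ((Nat.sqrt n.toNat : Int) + 1) 1).any (pv_trig n r) = false := by
        rw [List.any_eq_false]
        intro q hq
        rw [PySem.List.mem_pyRange_one] at hq
        unfold pv_trig
        by_cases hqs : (pv_strip q.toNat n.toNat == 1) = true
        · by_cases hqp : pv_is_prime q = true
          · by_cases hqd : (PySem.Int.mod n q == 0) = true
            · exfalso
              have hqP : Nat.Prime q.toNat := (pv_is_prime_iff q (by omega)).mp hqp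
              obtain ⟨j, hj⟩ := pv_strip_eq_one_pow q.toNat (hqP.two_le) n.toNat (beq_iff_eq.mp hqs)
              have hp0q : p0 = q.toNat := by
                have hd : p0 ∣ q.toNat ^ j := by rw [← hj]; exact hp0dvd
                exact (Nat.prime_dvd_prime_iff_eq hp0prime hqP).mp
                  (hp0prime.dvd_of_dvd_pow hd)
              exact hs (by rw [hp0q, hj]; exact pv_strip_pow q.toNat j hqP.two_le)
            · simp [hqd]
          · simp [hqp]
        · simp [hqs]
      rw [hany]
      have hnp : pv_is_prime n = false := by
        rw [← Bool.not_eq_true, pv_is_prime_iff n hn]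
        intro hP
        rcases hP.eq_one_or_self_of_dvd p0 hp0dvd with h | h
        · omega
        · nlinarith
      simp [pv_fallA, hnp, hs]
  · -- no divisor up to sqrt n: both sides reduce to the primality fallback
    have hdiv' : ∀ q : Nat, 2 ≤ q → q * q ≤ n.toNat → ¬ q ∣ n.toNat :=
      fun q h1 h2 h3 => hdiv ⟨q, h1, h2, h3⟩
    have hnodvd : ∀ q : Nat, 2 ≤ q → (q : Int) * q ≤ n → ¬ (q : Int) ∣ n := by
      intro q h2q hsq hqd
      have hqN : q ∣ n.toNat := by
        have : ((q : Nat) : Int) ∣ ((n.toNat : Nat) : Int) := by rw [← hxe]; exact hqd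
        exact_mod_cast this
      have hsqN : q * q ≤ n.toNat := by
        have : ((q * q : Nat) : Int) ≤ ((n.toNat : Nat) : Int) := by push_cast; rw [← hxe]; exact hsq
        exact_mod_cast this
      exact hdiv' q h2q hsqN hqN
    rw [is_prime_power_alt,
      pv_loopBF_no_div n r (n.toNat + 1) 2 (by omega) (by omega) (by omega)
        (fun q hq => hnodvd q hq)]
    have hany : (PySem.List.pyRange 2 ((Nat.sqrt n.toNat : Int) + 1) 1).any (pv_trig n r) = false := by
      rw [List.any_eq_false]
      intro q hq
      rw [PySem.List.mem_pyRange_one] at hq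
      unfold pv_trig
      by_cases hqd : (PySem.Int.mod n q == 0) = true
      · exfalso
        have h1 : q ∣ n := (PySem.Int.mod_eq_zero_iff_dvd _ _).mp (beq_iff_eq.mp hqd)
        have hqN : q.toNat ∣ n.toNat := by
          have : ((q.toNat : Nat) : Int) ∣ ((n.toNat : Nat) : Int) := by
            rw [Int.toNat_of_nonneg (by omega : (0:Int) ≤ q), ← hxe]; exact h1
          exact_mod_cast this
        have hq' : q.toNat ≤ Nat.sqrt n.toNat := by omega
        exact hdiv' q.toNat (by omega) (Nat.le_sqrt.mp hq') hqN
      · simp [hqd]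
    rw [hany]
    by_cases hlt : n < 2
    · have hnp : pv_is_prime n = false := by rw [pv_is_prime]; simp [hlt]
      simp [pv_fallA, hnp, hlt]
    · have hnp : pv_is_prime n = true := by
        rw [pv_is_prime_iff n hn, Nat.prime_def_le_sqrt]
        exact ⟨by omega, fun m h2m hms hmd => hdiv' m h2m (Nat.le_sqrt.mp hms) hmd⟩
      cases hb : (r && n == 2) <;> simp [pv_fallA, hnp, hlt, hb]

-- ===== VERDICT (by name: the statement is the Claim_ definition above) =====
theorem is_prime_power_spec : Claim_equal_is_prime_power := by
  intro n r _ hpre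
  exact pv_main n r hpre
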